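-- pv_equiv track=rewrite | github.com/n-i-p/algorithms | codeforces/12A/12A.py | func_sol
-- ===== SOURCE A (Python) =====
-- def func_sol(raw_data):
--     a = raw_data.split('\n')[:-1]
--     n = len(a)
--     for i in range(n):
--         for j in range(i + 1):
--             if a[i][j] != a[n - i - 1][n - j - 1]:
--                 return "NO"
--     return "YES"
-- ===== SOURCE B (Python) =====
-- def func_sol(raw_data):
--     a = raw_data.split('\n')[:-1]
--     s = ''.join(a)
--     return "YES" if s == s[::-1] else "NO"
-- ===== Notes on version B (the rewrite author's own statement) =====
-- stated objective: simpler
-- what changed: Replaces the nested index loops over the lower-triangular half of the grid by flattening the rows into one string and testing whether it is a palindrome (central symmetry of an n×n grid is exactly the flattened string reading the same backwards).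
-- outside the precondition, e.g. on func_sol('ab\n'): A returns 'YES', B returns 'NO'
import Mathlib
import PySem

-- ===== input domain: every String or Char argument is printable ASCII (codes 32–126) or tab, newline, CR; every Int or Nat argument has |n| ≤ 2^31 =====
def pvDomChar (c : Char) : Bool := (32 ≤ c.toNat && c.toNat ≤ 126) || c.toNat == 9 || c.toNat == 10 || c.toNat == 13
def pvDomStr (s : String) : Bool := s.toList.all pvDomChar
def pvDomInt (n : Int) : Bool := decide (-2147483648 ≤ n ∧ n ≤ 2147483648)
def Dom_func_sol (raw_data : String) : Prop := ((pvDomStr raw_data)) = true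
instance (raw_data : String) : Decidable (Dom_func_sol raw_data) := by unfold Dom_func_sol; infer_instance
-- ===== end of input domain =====

-- B replaces the nested triangular index loops by one join and one palindrome test; objective: simpler.

-- ===== PORT A =====
-- shared preprocessing: a = raw_data.split('\n')[:-1]   (sep '\n' ≠ '', so split? is some)
def pvRows (raw_data : String) : List String :=
  PySem.List.slice ((PySem.Str.split? raw_data "\n").getD []) none (some (-1))

-- a[i][j] (none = IndexError; Pre_ keeps all probed indices in range)
def pvCellA (a : List String) (i j : Int) : Option Char :=
  match PySem.List.pyGet? a i with
  | none => none
  | some s => PySem.Str.pyGet? s j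

def func_sol (raw_data : String) : String :=
  let a := pvRows raw_data
  let n : Int := PySem.List.len a
  -- for i in range(n): for j in range(i+1): if a[i][j] != a[n-i-1][n-j-1]: return "NO"
  if (PySem.List.pyRange 0 n 1).any (fun i =>
      (PySem.List.pyRange 0 (i + 1) 1).any (fun j =>
        pvCellA a i j != pvCellA a (n - i - 1) (n - j - 1)))
  then "NO" else "YES"

-- ===== PORT B =====
def func_sol_alt (raw_data : String) : String :=
  let a := pvRows raw_data
  let s := PySem.Str.join "" a
  -- s[::-1]: step -1 ≠ 0, so slice? is always some; the getD default is never used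
  if s == (PySem.Str.slice? s none none (-1)).getD s then "YES" else "NO"

-- ===== PRECONDITION & SPEC =====
-- Pre_ keeps exactly the square grids (each extracted line as long as the number of lines); on
-- ragged input A either raises IndexError or compares an accidental subset of cells, a value
-- nobody would specify.
def Pre_func_sol (raw_data : String) : Prop :=
  ∀ r ∈ pvRows raw_data, r.toList.length = (pvRows raw_data).length
instance (raw_data : String) : Decidable (Pre_func_sol raw_data) := by unfold Pre_func_sol; infer_instance

def pvWitness_func_sol : String := "ab\nba\n"

def Spec_func_sol (raw_data : String) (out : String) : Prop := out = func_sol_alt raw_data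
instance (raw_data : String) (out : String) : Decidable (Spec_func_sol raw_data out) := by unfold Spec_func_sol; infer_instance

-- ===== CLAIM (what is proved, stated in full; the proofs are below) =====
def Claim_equal_func_sol : Prop := ∀ (raw_data : String), Dom_func_sol raw_data → Pre_func_sol raw_data → Spec_func_sol raw_data (func_sol raw_data)

-- ===== LEMMAS AND PROOFS =====

-- ''.join on the char-list side is flatten
lemma pvJoinEmpty (ls : List (List Char)) : PySem.Chars.join [] ls = ls.flatten := by
  induction ls with
  | nil => simp [PySem.Chars.join_nil]
  | cons p t ih =>
    cases t with
    | nil => simp [PySem.Chars.join_singleton]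
    | cons q r => rw [PySem.Chars.join_cons_cons, ih]; simp

lemma pvFlatLen (m : Nat) (g : List (List Char)) (h : ∀ r ∈ g, r.length = m) :
    g.flatten.length = g.length * m := by
  induction g with
  | nil => simp
  | cons r t ih =>
    have hr : r.length = m := h r (by simp)
    have ht : ∀ r' ∈ t, r'.length = m := fun r' hr' => h r' (by simp [hr'])
    simp only [List.flatten_cons, List.length_append, List.length_cons, ih ht, hr]
    ring

lemma pvFlatIdx (m j : Nat) (hj : j < m) :
    ∀ (g : List (List Char)) (i : Nat), (∀ r ∈ g, r.length = m) →
      g.flatten[i * m + j]? = g[i]?.bind (fun r => r[j]?) := by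
  intro g
  induction g with
  | nil => intro i _; simp
  | cons r t ih =>
    intro i h
    have hr : r.length = m := h r (by simp)
    have ht : ∀ r' ∈ t, r'.length = m := fun r' hr' => h r' (by simp [hr'])
    cases i with
    | zero =>
      simp only [List.flatten_cons, Nat.zero_mul, Nat.zero_add]
      rw [List.getElem?_append_left (by omega)]
      simp
    | succ i' =>
      have harith : (i' + 1) * m + j = r.length + (i' * m + j) := by rw [hr]; ring
      simp only [List.flatten_cons, harith]
      rw [List.getElem?_append_right (by omega)]
      simpa using ih i' ht

lemma pvPalIff (l : List Char) : l = l.reverse ↔ ∀ k < l.length, l[k]? = l[l.length - 1 - k]? := by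
  constructor
  · intro h k hk
    conv_lhs => rw [h]
    exact List.getElem?_reverse hk
  · intro h
    apply List.ext_getElem?
    intro k
    by_cases hk : k < l.length
    · rw [List.getElem?_reverse hk]
      exact h k hk
    · rw [List.getElem?_eq_none (by omega), List.getElem?_eq_none (by simp; omega)]

lemma pvSym (f : Nat → Nat → Option Char) (n : Nat)
    (h : ∀ i < n, ∀ j ≤ i, f i j = f (n - 1 - i) (n - 1 - j)) :
    ∀ i < n, ∀ j < n, f i j = f (n - 1 - i) (n - 1 - j) := by
  intro i hi j hj
  by_cases hji : j ≤ i
  · exact h i hi j hji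
  · have h2 := h (n - 1 - i) (by omega) (n - 1 - j) (by omega)
    rw [show n - 1 - (n - 1 - i) = i by omega, show n - 1 - (n - 1 - j) = j by omega] at h2
    exact h2.symm

lemma pvMirror (n i j k : Nat) (hi : i < n) (hj : j < n) (hk : k = i * n + j) :
    n * n - 1 - k = (n - 1 - i) * n + (n - 1 - j) := by
  subst hk
  have hlt : i * n + j < n * n := by
    calc i * n + j < i * n + n := by omega
      _ = (i + 1) * n := by ring
      _ ≤ n * n := Nat.mul_le_mul_right n (by omega)
  have h2 : (n - 1 - i) * n + (n - 1 - j) + (i * n + j) + 1 = n * n := by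
    have e1 : n - 1 - i + i + 1 = n := by omega
    calc (n - 1 - i) * n + (n - 1 - j) + (i * n + j) + 1
        = (n - 1 - i + i) * n + ((n - 1 - j) + j + 1) := by ring
      _ = (n - 1 - i + i) * n + n := by omega
      _ = (n - 1 - i + i + 1) * n := by ring
      _ = n * n := by rw [e1]
  omega

lemma pvCore (g : List (List Char)) (h : ∀ r ∈ g, r.length = g.length) :
    (∀ i < g.length, ∀ j ≤ i,
        g[i]?.bind (fun r => r[j]?) = g[g.length - 1 - i]?.bind (fun r => r[g.length - 1 - j]?))
      ↔ g.flatten = g.flatten.reverse := by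
  have hL : g.flatten.length = g.length * g.length := pvFlatLen g.length g h
  rw [pvPalIff, hL]
  constructor
  · intro h1 k hk
    have hn0 : 0 < g.length := by
      rcases Nat.eq_zero_or_pos g.length with h0 | h0
      · rw [h0] at hk; simp at hk
      · exact h0
    have hj : k % g.length < g.length := Nat.mod_lt _ hn0
    have hi : k / g.length < g.length := (Nat.div_lt_iff_lt_mul hn0).mpr hk
    have hk' : k = (k / g.length) * g.length + k % g.length := by
      rw [Nat.mul_comm]; exact (Nat.div_add_mod k g.length).symm
    rw [pvMirror g.length (k / g.length) (k % g.length) k hi hj hk',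
        pvFlatIdx g.length (g.length - 1 - (k % g.length)) (by omega) g _ h]
    conv_lhs => rw [hk']
    rw [pvFlatIdx g.length (k % g.length) hj g _ h]
    exact pvSym (fun i j => g[i]?.bind (fun r => r[j]?)) g.length h1 _ hi _ hj
  · intro h3 i hi j hj
    have hj' : j < g.length := lt_of_le_of_lt hj hi
    have hk : i * g.length + j < g.length * g.length := by
      calc i * g.length + j < i * g.length + g.length := by omega
        _ = (i + 1) * g.length := by ring
        _ ≤ g.length * g.length := Nat.mul_le_mul_right _ (by omega)
    have h4 := h3 (i * g.length + j) hk
    rw [pvFlatIdx g.length j hj' g i h,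
        pvMirror g.length i j _ hi hj' rfl,
        pvFlatIdx g.length (g.length - 1 - j) (by omega) g _ h] at h4
    exact h4

lemma pvCellA_cast (a : List String) (i j : Nat) :
    pvCellA a (i : Int) (j : Int) = (a.map String.toList)[i]?.bind (fun r => r[j]?) := by
  unfold pvCellA
  rw [PySem.List.pyGet?_natCast, List.getElem?_map]
  cases a[i]? with
  | none => rfl
  | some s => simp

lemma pvMain (a : List String) (hpre : ∀ r ∈ a, r.toList.length = a.length) :
    (if (PySem.List.pyRange 0 (PySem.List.len a) 1).any (fun i =>
        (PySem.List.pyRange 0 (i + 1) 1).any (fun j =>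
          pvCellA a i j != pvCellA a (PySem.List.len a - i - 1) (PySem.List.len a - j - 1)))
     then "NO" else "YES")
    = (if PySem.Str.join "" a ==
          (PySem.Str.slice? (PySem.Str.join "" a) none none (-1)).getD (PySem.Str.join "" a)
       then "YES" else "NO") := by
  have hg : ∀ r ∈ a.map String.toList, r.length = (a.map String.toList).length := by
    intro r hr
    simp only [List.mem_map] at hr
    obtain ⟨s, hs, rfl⟩ := hr
    simpa using hpre s hs
  have hgl : (a.map String.toList).length = a.length := by simp
  have hcore := pvCore (a.map String.toList) hg
  rw [hgl] at hcore
  have hsL : (PySem.Str.join "" a).toList = (a.map String.toList).flatten := by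
    rw [PySem.Str.toList_join]
    simpa using pvJoinEmpty (a.map String.toList)
  have hiffB : (PySem.Str.join "" a ==
        (PySem.Str.slice? (PySem.Str.join "" a) none none (-1)).getD (PySem.Str.join "" a)) = true
      ↔ (a.map String.toList).flatten = (a.map String.toList).flatten.reverse := by
    rw [PySem.Str.slice?_none_none_neg_one, Option.getD_some, beq_iff_eq]
    constructor
    · intro h
      have h2 := congrArg String.toList h
      rw [String.toList_ofList, hsL] at h2
      exact h2
    · intro h
      conv_lhs => rw [← String.ofList_toList (s := PySem.Str.join "" a)]
      exact congrArg String.ofList (by rw [hsL]; exact h)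
  have hboolA : ((PySem.List.pyRange 0 (PySem.List.len a) 1).any (fun i =>
        (PySem.List.pyRange 0 (i + 1) 1).any (fun j =>
          pvCellA a i j != pvCellA a (PySem.List.len a - i - 1) (PySem.List.len a - j - 1)))) = false
      ↔ (∀ i < a.length, ∀ j ≤ i,
          (a.map String.toList)[i]?.bind (fun r => r[j]?)
            = (a.map String.toList)[a.length - 1 - i]?.bind
                (fun r => r[a.length - 1 - j]?)) := by
    rw [Bool.eq_false_iff]
    simp only [ne_eq, List.any_eq_true, PySem.List.mem_pyRange_one, PySem.List.len_eq, bne_iff_ne]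
    push Not
    constructor
    · intro H i hi j hj
      have h1 := H (i : Int) ⟨by positivity, by exact_mod_cast hi⟩ (j : Int)
        ⟨by positivity, by exact_mod_cast Nat.lt_succ_of_le hj⟩
      rw [show ((a.length : Int) - (i : Int) - 1) = ((a.length - 1 - i : Nat) : Int) by omega,
          show ((a.length : Int) - (j : Int) - 1) = ((a.length - 1 - j : Nat) : Int) by omega,
          pvCellA_cast, pvCellA_cast] at h1
      exact h1
    · intro H i hi j hj
      obtain ⟨h0i, hi2⟩ := hi
      obtain ⟨h0j, hj2⟩ := hj
      lift i to Nat using h0i with i'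
      lift j to Nat using h0j with j'
      have hi' : i' < a.length := by exact_mod_cast hi2
      have hj' : j' ≤ i' := by omega
      rw [show ((a.length : Int) - (i' : Int) - 1) = ((a.length - 1 - i' : Nat) : Int) by omega,
          show ((a.length : Int) - (j' : Int) - 1) = ((a.length - 1 - j' : Nat) : Int) by omega,
          pvCellA_cast, pvCellA_cast]
      exact H i' hi' j' hj'
  by_cases hp : (a.map String.toList).flatten = (a.map String.toList).flatten.reverse
  · have hA := hboolA.mpr (hcore.mpr hp)
    have hB := hiffB.mpr hp
    rw [hA, hB]
    simp
  · have hA : ((PySem.List.pyRange 0 (PySem.List.len a) 1).any (fun i =>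
        (PySem.List.pyRange 0 (i + 1) 1).any (fun j =>
          pvCellA a i j != pvCellA a (PySem.List.len a - i - 1) (PySem.List.len a - j - 1)))) = true :=
      Bool.ne_false_iff.mp (fun h => hp (hcore.mp (hboolA.mp h)))
    have hB : (PySem.Str.join "" a ==
        (PySem.Str.slice? (PySem.Str.join "" a) none none (-1)).getD (PySem.Str.join "" a)) = false :=
      Bool.eq_false_iff.mpr (fun h => hp (hiffB.mp h))
    rw [hA, hB]
    simp

-- ===== VERDICT (by name: the statement is the Claim_ definition above) =====
theorem func_sol_spec : Claim_equal_func_sol := by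
  intro raw_data _ hpre
  unfold Spec_func_sol func_sol func_sol_alt
  exact pvMain (pvRows raw_data) hpre
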